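-- pv_equiv track=rewrite | github.com/jrziviani/AdventOfCode | 2025/day_11/day11.py | dfs
-- ===== SOURCE A (Python) =====
-- def dfs(circuit: dict[str, list[str]], name: str, visited: set[str], memo: dict[str, int]) -> int:
--     if name == 'out':
--         return 1
--
--     if name in memo:
--         return memo[name]
--
--     if name not in circuit or not circuit[name]:
--         memo[name] = 0
--         return 0
--
--     visited.add(name)
--
--     count_paths = 0
--     for neighbors in circuit[name]:
--         count_paths += dfs(circuit, neighbors, visited, memo)
--
--     visited.remove(name)
--     memo[name] = count_paths
--
--     return memo[name]
-- ===== SOURCE B (Python) =====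
-- # Return-value re-implementation: iterative fixpoint DP instead of memoized recursion.
-- # (A also mutates `memo`/`visited` in place; the equivalence claimed is about the return value only.)
-- def dfs(circuit: dict[str, list[str]], name: str, visited: set[str], memo: dict[str, int]) -> int:
--     def known(n):
--         # value of a gate known without looking at the table: 'out', memoized, or a dead end
--         if n == 'out':
--             return 1
--         if n in memo:
--             return memo[n]
--         if n not in circuit or not circuit[n]:
--             return 0
--         return None
--
--     k = known(name)
--     if k is not None:
--         return k
--     # relax a path-count table once per possible path depth (the circuit is a DAG)
--     f = {node: 0 for node in circuit}
--     for _ in range(len(circuit) + 1):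
--         f = {node: known(node) if known(node) is not None
--                    else sum(known(b) if known(b) is not None else f[b]
--                             for b in circuit[node])
--              for node in circuit}
--     return f[name]
-- ===== Notes on version B (the rewrite author's own statement) =====
-- stated objective: alternative
-- what changed: Replaces the memoized recursive DFS by an iterative Bellman-style fixpoint: a path-count table over all gates is relaxed len(circuit)+1 times and the answer is read off, with no recursion and no memo writes (the claim is about the return value; A also mutates memo/visited in place).
import Mathlib
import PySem

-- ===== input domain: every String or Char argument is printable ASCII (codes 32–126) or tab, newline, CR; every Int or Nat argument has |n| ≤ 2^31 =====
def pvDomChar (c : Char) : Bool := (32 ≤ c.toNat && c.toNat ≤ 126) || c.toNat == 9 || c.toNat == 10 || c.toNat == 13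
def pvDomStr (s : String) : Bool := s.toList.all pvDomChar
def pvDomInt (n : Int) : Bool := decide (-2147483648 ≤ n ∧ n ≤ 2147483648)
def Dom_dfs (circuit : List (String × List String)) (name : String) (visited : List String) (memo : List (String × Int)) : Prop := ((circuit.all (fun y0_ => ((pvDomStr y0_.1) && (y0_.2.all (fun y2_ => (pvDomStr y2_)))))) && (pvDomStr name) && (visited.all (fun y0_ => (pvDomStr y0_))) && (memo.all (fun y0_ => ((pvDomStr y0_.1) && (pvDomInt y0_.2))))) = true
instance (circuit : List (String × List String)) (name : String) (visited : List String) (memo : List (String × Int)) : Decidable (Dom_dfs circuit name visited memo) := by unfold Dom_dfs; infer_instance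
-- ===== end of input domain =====

-- B replaces A's memoized recursive DFS by an iterative fixpoint relaxation of a path-count
-- table (objective: alternative algorithm, not claimed faster). A mutates `memo` (and
-- transiently `visited`) in place; B does not — the equivalence proved is about the RETURN value.

-- ===== PORT A =====
-- A's recursion is not structurally terminating in Lean, so it is run with fuel
-- `circuit.length + 1`; the proofs below show this fuel is never exhausted on inputs
-- satisfying Pre_dfs (A's Python raises RecursionError exactly on the inputs Pre_dfs excludes).

-- the `for neighbors in circuit[name]: count_paths += dfs(...)` loop, threading the memo dict
def dfsAList (g : String → PySem.Dict String Int → Int × PySem.Dict String Int) :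
    List String → Int → PySem.Dict String Int → Int × PySem.Dict String Int
  | [], acc, m => (acc, m)
  | b :: bs, acc, m =>
    let q := g b m
    dfsAList g bs (acc + q.1) q.2

def dfsA (c : PySem.Dict String (List String)) :
    Nat → String → PySem.Dict String Int → Int × PySem.Dict String Int
  | 0, _, m => (0, m)
  | fuel + 1, n, m =>
    if n = "out" then (1, m)
    else
      match m.get? n with
      | some v => (v, m)
      | none =>
        match c.get? n with
        | none => (0, m.insert n 0)
        | some l =>
          if l = [] then (0, m.insert n 0)
          else
            let p := dfsAList (fun b m' => dfsA c fuel b m') l 0 m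
            (p.1, p.2.insert n p.1)

def dfs (circuit : List (String × List String)) (name : String) (visited : List String) (memo : List (String × Int)) : Int :=
  (dfsA (PySem.Dict.mk circuit) (circuit.length + 1) name (PySem.Dict.mk memo)).1

-- ===== PORT B =====
-- `known(n)` of Source B: the value of a gate known without the table, else none
def baseB (c : PySem.Dict String (List String)) (m0 : PySem.Dict String Int) (n : String) : Option Int :=
  if n = "out" then some 1
  else
    match m0.get? n with
    | some v => some v
    | none =>
      match c.get? n with
      | none => some 0
      | some l => if l = [] then some 0 else none

-- `f = {node: 0 for node in circuit}`
def initB (c : PySem.Dict String (List String)) : PySem.Dict String Int :=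
  c.items.foldl (fun acc p => acc.insert p.1 0) PySem.Dict.empty

-- the value the rebuilding dict comprehension assigns to key `k`
def valB (c : PySem.Dict String (List String)) (m0 : PySem.Dict String Int)
    (f : PySem.Dict String Int) (k : String) : Int :=
  match baseB c m0 k with
  | some v => v
  | none =>
    ((c.getD k []).map (fun b =>
       match baseB c m0 b with
       | some v => v
       | none => f.getD b 0)).sum

-- one relaxation round: `f = {node: ... for node in circuit}`
def stepB (c : PySem.Dict String (List String)) (m0 : PySem.Dict String Int)
    (f : PySem.Dict String Int) : PySem.Dict String Int :=
  c.items.foldl (fun acc p => acc.insert p.1 (valB c m0 f p.1)) PySem.Dict.empty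

def dfs_alt (circuit : List (String × List String)) (name : String) (visited : List String) (memo : List (String × Int)) : Int :=
  let c := PySem.Dict.mk circuit
  let m0 := PySem.Dict.mk memo
  match baseB c m0 name with
  | some v => v
  | none =>
    -- `return f[name]`: `name` is a key of `f` here, so Python's lookup cannot fail; getD is exact
    ((List.range (circuit.length + 1)).foldl (fun f _ => stepB c m0 f) (initB c)).getD name 0

-- ===== PRECONDITION & SPEC =====
-- `settledB c m0 r n`: every path in the circuit from `n` through gates that are not already
-- memoized reaches a terminal ('out', a memoized gate, a missing gate or an empty gate list)
-- in fewer than `r` steps.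
def settledB (c : PySem.Dict String (List String)) (m0 : PySem.Dict String Int) :
    Nat → String → Bool
  | 0, _ => false
  | r + 1, n =>
    n == "out" || (m0.get? n).isSome ||
      match c.get? n with
      | none => true
      | some l => l.all (fun b => settledB c m0 r b)

-- Pre_dfs excludes exactly the inputs on which A's recursion never terminates (Python raises
-- RecursionError): those where a cycle of un-memoized gates is reachable from `name`. On every
-- input where A returns, the recursion depth is at most the number of keys + 1, so Pre_dfs holds.
def Pre_dfs (circuit : List (String × List String)) (name : String) (visited : List String) (memo : List (String × Int)) : Prop :=
  settledB (PySem.Dict.mk circuit) (PySem.Dict.mk memo) (circuit.length + 1) name = true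
instance (circuit : List (String × List String)) (name : String) (visited : List String) (memo : List (String × Int)) : Decidable (Pre_dfs circuit name visited memo) := by unfold Pre_dfs; infer_instance

def pvWitness_dfs : (List (String × List String)) × String × List String × (List (String × Int)) :=
  ([("a", ["b", "out"]), ("b", ["out"])], "a", [], [])

def Spec_dfs (circuit : List (String × List String)) (name : String) (visited : List String) (memo : List (String × Int)) (out : Int) : Prop := out = dfs_alt circuit name visited memo
instance (circuit : List (String × List String)) (name : String) (visited : List String) (memo : List (String × Int)) (out : Int) : Decidable (Spec_dfs circuit name visited memo out) := by unfold Spec_dfs; infer_instance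

-- ===== CLAIM (what is proved, stated in full; the proofs are below) =====
def Claim_equal_dfs : Prop := ∀ (circuit : List (String × List String)) (name : String) (visited : List String) (memo : List (String × Int)), Dom_dfs circuit name visited memo → Pre_dfs circuit name visited memo → Spec_dfs circuit name visited memo (dfs circuit name visited memo)

-- ===== LEMMAS AND PROOFS =====

-- the common functional specification: the path count of gate `n` at relaxation depth `r`,
-- consulting the ORIGINAL memo `m0`
def pureF (c : PySem.Dict String (List String)) (m0 : PySem.Dict String Int) :
    Nat → String → Int
  | 0, _ => 0
  | r + 1, n =>
    if n = "out" then 1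
    else
      match m0.get? n with
      | some v => v
      | none =>
        match c.get? n with
        | none => 0
        | some l => if l = [] then 0 else (l.map (fun b => pureF c m0 r b)).sum

-- memo-dict invariant of A's run: original entries are preserved, and every entry is either
-- original or a settled, correctly computed gate
def goodM (c : PySem.Dict String (List String)) (m0 : PySem.Dict String Int) (N : Nat)
    (m : PySem.Dict String Int) : Prop :=
  (∀ k v, m0.get? k = some v → m.get? k = some v) ∧
  (∀ k v, m.get? k = some v →
    m0.get? k = some v ∨
      (m0.get? k = none ∧ k ≠ "out" ∧ settledB c m0 N k = true ∧ v = pureF c m0 N k))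

theorem settledB_mono (c : PySem.Dict String (List String)) (m0 : PySem.Dict String Int) :
    ∀ r s n, r ≤ s → settledB c m0 r n = true → settledB c m0 s n = true := by
  intro r
  induction r with
  | zero => intro s n _ h; simp [settledB] at h
  | succ r ih =>
    intro s n hrs h
    obtain ⟨s', rfl⟩ : ∃ s', s = s' + 1 := ⟨s - 1, by omega⟩
    simp only [settledB] at h ⊢
    rcases Bool.or_eq_true_iff.mp h with h1 | h2
    · exact Bool.or_eq_true_iff.mpr (Or.inl h1)
    · refine Bool.or_eq_true_iff.mpr (Or.inr ?_)
      cases hc : c.get? n with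
      | none => simp
      | some l =>
        rw [hc] at h2
        simp only [List.all_eq_true] at h2 ⊢
        exact fun b hb => ih s' b (by omega) (h2 b hb)

theorem pureF_stab (c : PySem.Dict String (List String)) (m0 : PySem.Dict String Int) :
    ∀ r n, settledB c m0 r n = true → ∀ s, r ≤ s → pureF c m0 s n = pureF c m0 r n := by
  intro r
  induction r with
  | zero => intro n h; simp [settledB] at h
  | succ r ih =>
    intro n h s hrs
    obtain ⟨s', rfl⟩ : ∃ s', s = s' + 1 := ⟨s - 1, by omega⟩
    simp only [pureF]
    by_cases hout : n = "out"
    · simp [hout]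
    · simp only [if_neg hout]
      cases hm : m0.get? n with
      | some v => rfl
      | none =>
        cases hc : c.get? n with
        | none => rfl
        | some l =>
          by_cases hl : l = []
          · simp [hl]
          · simp only [if_neg hl]
            simp only [settledB, hm, hc, beq_iff_eq, hout, Option.isSome_none,
              Bool.false_or, Bool.or_eq_true, decide_eq_true_eq, List.all_eq_true] at h
            rcases h with h | h
            · simp at h
            · congr 1
              exact List.map_congr_left (fun b hb => ih b (h b hb) s' (by omega))

theorem baseB_some (c : PySem.Dict String (List String)) (m0 : PySem.Dict String Int)
    (n : String) (v : Int) (h : baseB c m0 n = some v) (r : Nat) :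
    pureF c m0 (r + 1) n = v := by
  unfold baseB at h
  simp only [pureF]
  by_cases hout : n = "out"
  · simp [hout] at h ⊢; omega
  · simp only [if_neg hout] at h ⊢
    cases hm : m0.get? n with
    | some w => rw [hm] at h; simp at h; omega
    | none =>
      rw [hm] at h
      cases hc : c.get? n with
      | none => rw [hc] at h; simp at h; omega
      | some l =>
        rw [hc] at h
        by_cases hl : l = []
        · simp [hl] at h ⊢; omega
        · simp [hl] at h

theorem baseB_none (c : PySem.Dict String (List String)) (m0 : PySem.Dict String Int)
    (n : String) (h : baseB c m0 n = none) :
    n ≠ "out" ∧ m0.get? n = none ∧ ∃ l, c.get? n = some l ∧ l ≠ [] := by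
  unfold baseB at h
  by_cases hout : n = "out"
  · simp [hout] at h
  · simp only [if_neg hout] at h
    cases hm : m0.get? n with
    | some w => simp [hm] at h
    | none =>
      rw [hm] at h
      cases hc : c.get? n with
      | none => rw [hc] at h; simp at h
      | some l =>
        rw [hc] at h
        by_cases hl : l = []
        · simp [hl] at h
        · exact ⟨hout, rfl, l, rfl, hl⟩

theorem foldl_insert_get? {ν : Type} (G : String → ν) :
    ∀ (l : List (String × List String)) (d : PySem.Dict String ν) (k : String),
      (l.foldl (fun acc p => acc.insert p.1 (G p.1)) d).get? k =
        if l.any (fun p => p.1 == k) then some (G k) else d.get? k := by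
  intro l
  induction l with
  | nil => intro d k; simp
  | cons p ps ih =>
    intro d k
    simp only [List.foldl_cons, List.any_cons, ih]
    by_cases hk : p.1 = k
    · subst hk
      by_cases hmem : ps.any (fun q => q.1 == p.1)
      · simp [hmem]
      · simp [hmem, PySem.Dict.get?_insert]
    · rw [PySem.Dict.get?_insert]
      simp only [beq_iff_eq, hk, if_neg (Ne.symm hk), false_or,
        show (p.1 == k) = false from beq_eq_false_iff_ne.mpr hk, Bool.false_or]

theorem pureF_active (c : PySem.Dict String (List String)) (m0 : PySem.Dict String Int)
    (n : String) (l : List String) (r : Nat) (hout : n ≠ "out") (hm : m0.get? n = none)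
    (hc : c.get? n = some l) (hl : l ≠ []) :
    pureF c m0 (r + 1) n = (l.map (fun b => pureF c m0 r b)).sum := by
  simp only [pureF, if_neg hout, hm, hc, if_neg hl]

theorem stepB_get? (c : PySem.Dict String (List String)) (m0 : PySem.Dict String Int)
    (f : PySem.Dict String Int) (j : Nat)
    (hf : ∀ b l, c.get? b = some l → baseB c m0 b = none → f.getD b 0 = pureF c m0 (j + 1) b) :
    ∀ k, c.items.any (fun p => p.1 == k) = true →
      (stepB c m0 f).get? k = some (pureF c m0 (j + 2) k) := by
  intro k hk
  unfold stepB
  rw [foldl_insert_get? (valB c m0 f) c.items PySem.Dict.empty k, if_pos hk]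
  congr 1
  unfold valB
  cases hb : baseB c m0 k with
  | some v => exact (baseB_some c m0 k v hb (j + 1)).symm
  | none =>
    obtain ⟨hout, hm, l, hc, hl⟩ := baseB_none c m0 k hb
    rw [pureF_active c m0 k l (j + 1) hout hm hc hl]
    rw [PySem.Dict.getD_eq_get?_getD, hc]
    simp only [Option.getD_some]
    congr 1
    refine List.map_congr_left (fun b hbmem => ?_)
    cases hbb : baseB c m0 b with
    | some v => exact (baseB_some c m0 b v hbb j).symm
    | none =>
      obtain ⟨_, _, l', hc', _⟩ := baseB_none c m0 b hbb
      exact hf b l' hc' hbb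

theorem runB_get? (c : PySem.Dict String (List String)) (m0 : PySem.Dict String Int) :
    ∀ j k, c.items.any (fun p => p.1 == k) = true →
      ((List.range (j + 1)).foldl (fun f _ => stepB c m0 f) (initB c)).get? k =
        some (pureF c m0 (j + 2) k) := by
  intro j
  induction j with
  | zero =>
    intro k hk
    rw [List.range_succ, List.range_zero, List.nil_append, List.foldl_cons, List.foldl_nil]
    refine stepB_get? c m0 (initB c) 0 ?_ k hk
    intro b l hc hbb
    have hbmem : c.items.any (fun p => p.1 == b) = true := by
      have hne : c.get? b ≠ none := by simp [hc]
      have hmem := (not_iff_not.mpr (PySem.Dict.get?_eq_none_iff_not_mem_keys c b)).mp hne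
      simp only [not_not] at hmem
      simp only [PySem.Dict.keys, List.mem_map] at hmem
      obtain ⟨p, hp, hp1⟩ := hmem
      exact List.any_eq_true.mpr ⟨p, hp, by simp [hp1]⟩
    unfold initB
    rw [PySem.Dict.getD_eq_get?_getD,
      foldl_insert_get? (fun _ => (0 : Int)) c.items PySem.Dict.empty b, if_pos hbmem]
    obtain ⟨houtb, hmb, lb, hcb, hlb⟩ := baseB_none c m0 b hbb
    simp only [pureF, if_neg houtb, hmb, hcb, if_neg hlb, Option.getD_some]
    simp
  | succ j ih =>
    intro k hk
    rw [List.range_succ, List.foldl_append, List.foldl_cons, List.foldl_nil]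
    refine stepB_get? c m0 _ (j + 1) ?_ k hk
    intro b l hc hbb
    have hbmem : c.items.any (fun p => p.1 == b) = true := by
      have hne : c.get? b ≠ none := by simp [hc]
      have hmem := (not_iff_not.mpr (PySem.Dict.get?_eq_none_iff_not_mem_keys c b)).mp hne
      simp only [not_not] at hmem
      simp only [PySem.Dict.keys, List.mem_map] at hmem
      obtain ⟨p, hp, hp1⟩ := hmem
      exact List.any_eq_true.mpr ⟨p, hp, by simp [hp1]⟩
    rw [PySem.Dict.getD_eq_get?_getD, ih b hbmem]
    rfl

theorem goodM_insert (c : PySem.Dict String (List String)) (m0 : PySem.Dict String Int)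
    (N : Nat) (m : PySem.Dict String Int) (hm : goodM c m0 N m) (n : String)
    (hout : n ≠ "out") (hm0n : m0.get? n = none) (hs : settledB c m0 N n = true)
    (v : Int) (hv : v = pureF c m0 N n) : goodM c m0 N (m.insert n v) := by
  constructor
  · intro k w h0
    rw [PySem.Dict.get?_insert]
    split_ifs with hkn
    · subst hkn; rw [hm0n] at h0; cases h0
    · exact hm.1 k w h0
  · intro k w h
    rw [PySem.Dict.get?_insert] at h
    split_ifs at h with hkn
    · obtain rfl : v = w := Option.some.inj h
      subst hkn
      exact Or.inr ⟨hm0n, hout, hs, hv⟩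
    · exact hm.2 k w h

theorem dfsA_main (c : PySem.Dict String (List String)) (m0 : PySem.Dict String Int) (N : Nat) :
    ∀ r, r ≤ N → ∀ n, settledB c m0 r n = true →
      ∀ m, goodM c m0 N m → ∀ fuel, r ≤ fuel →
        (dfsA c fuel n m).1 = pureF c m0 N n ∧ goodM c m0 N (dfsA c fuel n m).2 := by
  intro r
  induction r with
  | zero => intro _ n hs; simp [settledB] at hs
  | succ r ih =>
    intro hrN n hs m hm fuel hrf
    obtain ⟨f, rfl⟩ : ∃ f, fuel = f + 1 := ⟨fuel - 1, by omega⟩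
    obtain ⟨N', rfl⟩ : ∃ N', N = N' + 1 := ⟨N - 1, by omega⟩
    simp only [dfsA]
    by_cases hout : n = "out"
    · simp only [if_pos hout]
      exact ⟨by simp [pureF, hout], hm⟩
    · rw [if_neg hout]
      cases hmn : m.get? n with
      | some v =>
        dsimp only
        refine ⟨?_, hm⟩
        rcases hm.2 n v hmn with h0 | ⟨_, _, _, hv⟩
        · simp [pureF, hout, h0]
        · exact hv
      | none =>
        have hm0n : m0.get? n = none := by
          cases h0 : m0.get? n with
          | some w => rw [hm.1 n w h0] at hmn; cases hmn
          | none => rfl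
        cases hcn : c.get? n with
        | none =>
          dsimp only
          refine ⟨by simp [pureF, hout, hm0n, hcn], ?_⟩
          exact goodM_insert c m0 _ m hm n hout hm0n (by simp [settledB, hcn])
            0 (by simp [pureF, hout, hm0n, hcn])
        | some l =>
          dsimp only
          by_cases hl : l = []
          · rw [if_pos hl]
            refine ⟨by simp [pureF, hout, hm0n, hcn, hl], ?_⟩
            exact goodM_insert c m0 _ m hm n hout hm0n (by simp [settledB, hcn, hl])
              0 (by simp [pureF, hout, hm0n, hcn, hl])
          · rw [if_neg hl]
            have hall : ∀ b ∈ l, settledB c m0 r b = true := by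
              simp only [settledB, hm0n, hcn, beq_iff_eq, hout, Option.isSome_none,
                Bool.or_eq_true, List.all_eq_true] at hs
              rcases hs with hs | hs
              · simp at hs
              · exact hs
            have hlist : ∀ bs, (∀ b ∈ bs, settledB c m0 r b = true) →
                ∀ acc m1, goodM c m0 (N' + 1) m1 →
                  (dfsAList (fun b m' => dfsA c f b m') bs acc m1).1 =
                    acc + (bs.map (fun b => pureF c m0 (N' + 1) b)).sum ∧
                  goodM c m0 (N' + 1) (dfsAList (fun b m' => dfsA c f b m') bs acc m1).2 := by
              intro bs
              induction bs with
              | nil => intro _ acc m1 hm1; simp [dfsAList]; exact hm1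
              | cons b bs ihb =>
                intro hbs acc m1 hm1
                simp only [dfsAList]
                obtain ⟨hv1, hg1⟩ := ih (by omega) b (hbs b (by simp)) m1 hm1 f (by omega)
                obtain ⟨hv2, hg2⟩ := ihb (fun x hx => hbs x (by simp [hx]))
                  (acc + (dfsA c f b m1).1) (dfsA c f b m1).2 hg1
                refine ⟨?_, hg2⟩
                rw [hv2, hv1]
                simp [add_assoc]
            obtain ⟨hv, hg⟩ := hlist l hall 0 m hm
            have hsum : (l.map (fun b => pureF c m0 (N' + 1) b)).sum =
                (l.map (fun b => pureF c m0 N' b)).sum := by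
              congr 1
              refine List.map_congr_left (fun b hb => ?_)
              rw [pureF_stab c m0 r b (hall b hb) (N' + 1) (by omega),
                pureF_stab c m0 r b (hall b hb) N' (by omega)]
            have hval : (dfsAList (fun b m' => dfsA c f b m') l 0 m).1 =
                pureF c m0 (N' + 1) n := by
              rw [hv, pureF_active c m0 n l N' hout hm0n hcn hl, hsum]
              ring
            refine ⟨hval, ?_⟩
            exact goodM_insert c m0 _ _ hg n hout hm0n
              (settledB_mono c m0 (r + 1) (N' + 1) n hrN hs) _ hval

-- a gate with a rule list is a key of the items list
theorem key_any (c : PySem.Dict String (List String)) (b : String) (l : List String)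
    (hc : c.get? b = some l) : c.items.any (fun p => p.1 == b) = true := by
  have hne : c.get? b ≠ none := by simp [hc]
  have hmem := (not_iff_not.mpr (PySem.Dict.get?_eq_none_iff_not_mem_keys c b)).mp hne
  simp only [not_not] at hmem
  simp only [PySem.Dict.keys, List.mem_map] at hmem
  obtain ⟨p, hp, hp1⟩ := hmem
  exact List.any_eq_true.mpr ⟨p, hp, by simp [hp1]⟩

-- ===== VERDICT (by name: the statement is the Claim_ definition above) =====
theorem dfs_spec : Claim_equal_dfs := by
  intro circuit name visited memo _hdom hpre
  unfold Spec_dfs dfs dfs_alt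
  dsimp only
  have hpre' : settledB (PySem.Dict.mk circuit) (PySem.Dict.mk memo)
      (circuit.length + 1) name = true := hpre
  have hgood0 : goodM (PySem.Dict.mk circuit) (PySem.Dict.mk memo) (circuit.length + 1)
      (PySem.Dict.mk memo) := ⟨fun _ _ h => h, fun _ _ h => Or.inl h⟩
  have hA := dfsA_main (PySem.Dict.mk circuit) (PySem.Dict.mk memo) (circuit.length + 1)
    (circuit.length + 1) le_rfl name hpre' (PySem.Dict.mk memo) hgood0
    (circuit.length + 1) le_rfl
  rw [hA.1]
  cases hb : baseB (PySem.Dict.mk circuit) (PySem.Dict.mk memo) name with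
  | some v => exact baseB_some _ _ name v hb circuit.length
  | none =>
    obtain ⟨hout, hm0, l, hc, hl⟩ := baseB_none _ _ name hb
    rw [PySem.Dict.getD_eq_get?_getD,
      runB_get? (PySem.Dict.mk circuit) (PySem.Dict.mk memo) circuit.length name
        (key_any _ name l hc)]
    simp only [Option.getD_some]
    exact (pureF_stab _ _ (circuit.length + 1) name hpre' (circuit.length + 2)
      (by omega)).symm
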